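-- pv_equiv track=rewrite | github.com/pypi-data/pypi-mirror-262 | packages/vectorplot/vectorplot-0.0.28-py3-none-any.whl/vectorplot/vp.py | equivalent3d
-- ===== SOURCE A (Python) =====
-- def equivalent3d(lista_vetores):
--     comp_x_eq = None
--     comp_y_eq = None
--     comp_z_eq = None
--
--     verif = str(type(lista_vetores[0]))
--     if verif == "<class 'tuple'>":
--         for i in range(len(lista_vetores)):
--             comp_x = lista_vetores[i][3] - lista_vetores[i][0]
--             comp_y = lista_vetores[i][4] - lista_vetores[i][1]
--             comp_z = lista_vetores[i][5] - lista_vetores[i][2]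
--
--             if comp_x_eq is None and comp_y_eq is None and comp_z_eq is None:
--                 comp_x_eq = comp_x
--                 comp_y_eq = comp_y
--                 comp_z_eq = comp_z
--             else:
--                 if comp_x_eq != comp_x or comp_y_eq != comp_y or comp_z_eq != comp_z:
--                     return False
--         return True
--     else:
--         for vector in lista_vetores:
--             comp_x = vector[0]
--             comp_y = vector[1]
--             comp_z = vector[2]
--             if comp_x_eq is None and comp_y_eq is None and comp_z_eq is None:
--                 comp_x_eq = comp_x
--                 comp_y_eq = comp_y
--                 comp_z_eq = comp_z
--             else:
--                 if comp_x_eq != comp_x or comp_y_eq != comp_y or comp_z_eq != comp_z: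
--                     return False
--         return True
-- ===== SOURCE B (Python) =====
-- def equivalent3d(lista_vetores):
--     if isinstance(lista_vetores[0], tuple):
--         triples = [(v[3] - v[0], v[4] - v[1], v[5] - v[2]) for v in lista_vetores]
--     else:
--         triples = [(v[0], v[1], v[2]) for v in lista_vetores]
--     # all triples are equal  iff  the list coincides with itself shifted by one
--     return triples[1:] == triples[:-1]
-- ===== Notes on version B (the rewrite author's own statement) =====
-- stated objective: simpler
-- what changed: B builds the list of component triples and decides all-equal by the shifted-slice identity triples[1:] == triples[:-1], removing A's reference element, None-sentinel accumulators and per-element comparison loop entirely.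
-- outside the precondition, e.g. on equivalent3d([[6, 1, 5], [-2, 6, 3], [-1]]): A returns False, B raises IndexError
import Mathlib
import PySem

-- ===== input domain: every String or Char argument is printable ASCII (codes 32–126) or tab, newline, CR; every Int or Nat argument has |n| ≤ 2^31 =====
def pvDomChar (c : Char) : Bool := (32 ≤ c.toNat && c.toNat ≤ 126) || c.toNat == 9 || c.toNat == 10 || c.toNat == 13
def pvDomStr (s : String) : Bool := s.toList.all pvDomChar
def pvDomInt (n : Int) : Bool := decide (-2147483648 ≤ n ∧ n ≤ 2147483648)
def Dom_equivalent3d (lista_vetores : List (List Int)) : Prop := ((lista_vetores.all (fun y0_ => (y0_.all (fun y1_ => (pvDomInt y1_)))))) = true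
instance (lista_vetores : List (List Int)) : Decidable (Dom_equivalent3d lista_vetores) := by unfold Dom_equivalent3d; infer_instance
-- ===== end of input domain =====

-- B replaces A's reference-element scan with None-sentinel accumulators by building the triple
-- list and comparing it with itself shifted by one (triples[1:] == triples[:-1]); return value only.
-- Under the type convention the argument is List (List Int), so A's tuple branch never fires.

-- ===== PORT A =====
-- the else-branch loop: state = comp_x_eq/comp_y_eq/comp_z_eq (all set together, so one Option)
def eqLoopA : List (List Int) → Option (Int × Int × Int) → Bool
  | [], _ => true
  | v :: rest, st =>
    let cx := (PySem.List.pyGet? v 0).getD 0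
    let cy := (PySem.List.pyGet? v 1).getD 0
    let cz := (PySem.List.pyGet? v 2).getD 0
    match st with
    | none => eqLoopA rest (some (cx, cy, cz))
    | some (ex, ey, ez) =>
      if ex ≠ cx ∨ ey ≠ cy ∨ ez ≠ cz then false else eqLoopA rest (some (ex, ey, ez))

def equivalent3d (lista_vetores : List (List Int)) : Bool :=
  -- verif = str(type(lista_vetores[0])); on List (List Int) it is never "<class 'tuple'>"
  eqLoopA lista_vetores none

-- ===== PORT B =====
def extractB (v : List Int) : Int × Int × Int :=
  ((PySem.List.pyGet? v 0).getD 0, (PySem.List.pyGet? v 1).getD 0, (PySem.List.pyGet? v 2).getD 0)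

def equivalent3d_alt (lista_vetores : List (List Int)) : Bool :=
  let triples := lista_vetores.map extractB
  decide (PySem.List.slice triples (some 1) none = PySem.List.slice triples none (some (-1)))

-- ===== PRECONDITION & SPEC =====
-- Pre_ excludes the empty list and lists containing a vector with fewer than 3 components:
-- on these A raises IndexError, except when a mismatch earlier in the scan makes it return False
-- before reaching the short vector; B extracts all triples first and so raises IndexError there.
def Pre_equivalent3d (lista_vetores : List (List Int)) : Prop :=
  lista_vetores ≠ [] ∧ ∀ v ∈ lista_vetores, 3 ≤ v.length
instance (lista_vetores : List (List Int)) : Decidable (Pre_equivalent3d lista_vetores) := by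
  unfold Pre_equivalent3d; infer_instance

def pvWitness_equivalent3d : List (List Int) := [[1, 2, 3], [1, 2, 3]]

def Spec_equivalent3d (lista_vetores : List (List Int)) (out : Bool) : Prop := out = equivalent3d_alt lista_vetores
instance (lista_vetores : List (List Int)) (out : Bool) : Decidable (Spec_equivalent3d lista_vetores out) := by unfold Spec_equivalent3d; infer_instance

-- ===== CLAIM =====
def Claim_equal_equivalent3d : Prop := ∀ (lista_vetores : List (List Int)), Dom_equivalent3d lista_vetores → Pre_equivalent3d lista_vetores → Spec_equivalent3d lista_vetores (equivalent3d lista_vetores)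

-- ===== LEMMAS AND PROOFS =====
theorem eqLoopA_some (rest : List (List Int)) (f : Int × Int × Int) :
    eqLoopA rest (some f) = rest.all (fun v => extractB v = f) := by
  induction rest with
  | nil => rfl
  | cons v rest ih =>
    obtain ⟨ex, ey, ez⟩ := f
    simp only [eqLoopA, List.all_cons, extractB]
    by_cases h : ex ≠ (PySem.List.pyGet? v 0).getD 0 ∨ ey ≠ (PySem.List.pyGet? v 1).getD 0 ∨
        ez ≠ (PySem.List.pyGet? v 2).getD 0
    · simp only [if_pos h]
      have hne : ¬ (((PySem.List.pyGet? v 0).getD 0, (PySem.List.pyGet? v 1).getD 0,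
          (PySem.List.pyGet? v 2).getD 0) = (ex, ey, ez)) := by
        intro heq
        injection heq with h1 h23
        injection h23 with h2 h3
        rcases h with h | h | h
        · exact h h1.symm
        · exact h h2.symm
        · exact h h3.symm
      simp [hne]
    · rw [not_or, not_or] at h
      simp only [not_not] at h
      obtain ⟨h1, h2, h3⟩ := h
      subst h1; subst h2; subst h3
      simp [ih, extractB, Prod.mk.injEq]

-- all-equal-to-a ↔ the list equals the dropLast of the list with a in front (the shift identity)
theorem all_eq_iff_shift {α : Type} [DecidableEq α] (l : List α) (a : α) :
    (l.all (fun x => x = a)) = decide (l = (a :: l).dropLast) := by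
  induction l generalizing a with
  | nil => rfl
  | cons b l ih =>
    simp only [List.all_cons, List.dropLast_cons_of_ne_nil (List.cons_ne_nil b l)]
    by_cases hba : b = a
    · subst hba
      simpa using ih b
    · simp [hba]

theorem eq_everywhere (l : List (List Int)) : equivalent3d l = equivalent3d_alt l := by
  cases l with
  | nil => rfl
  | cons v rest =>
    simp only [equivalent3d, equivalent3d_alt, eqLoopA, eqLoopA_some, List.map_cons,
      PySem.List.slice_from_one, PySem.List.slice_to_neg_one, List.tail_cons]
    have h : ((PySem.List.pyGet? v 0).getD 0, (PySem.List.pyGet? v 1).getD 0,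
        (PySem.List.pyGet? v 2).getD 0) = extractB v := rfl
    rw [h, ← all_eq_iff_shift (rest.map extractB) (extractB v)]
    simp [List.all_map, Function.comp_def]

-- ===== VERDICT =====
theorem equivalent3d_spec : Claim_equal_equivalent3d := by
  intro l _ _
  exact (eq_everywhere l).symm ▸ rfl
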